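-- pv_equiv track=rewrite | github.com/harislee168/CodeWars | Spacey.py | spacey
-- ===== SOURCE A (Python) =====
-- def spacey(array):
--     len_array = len(array)
--     return_list = []
--
--     for index in range(len_array):
--         return_word = ''
--         for second_index in range(index+1):
--             return_word += array[second_index]
--         return_list.append(return_word)
--     return return_list
-- ===== SOURCE B (Python) =====
-- def spacey(array):
--     result = []
--     acc = ''
--     for word in array:
--         acc += word
--         result.append(acc)
--     return result
-- ===== Notes on version B (the rewrite author's own statement) =====
-- stated objective: faster
-- what changed: Replaces the nested loop that rebuilds each prefix from scratch with a single pass maintaining a running accumulator string.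
import Mathlib
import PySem

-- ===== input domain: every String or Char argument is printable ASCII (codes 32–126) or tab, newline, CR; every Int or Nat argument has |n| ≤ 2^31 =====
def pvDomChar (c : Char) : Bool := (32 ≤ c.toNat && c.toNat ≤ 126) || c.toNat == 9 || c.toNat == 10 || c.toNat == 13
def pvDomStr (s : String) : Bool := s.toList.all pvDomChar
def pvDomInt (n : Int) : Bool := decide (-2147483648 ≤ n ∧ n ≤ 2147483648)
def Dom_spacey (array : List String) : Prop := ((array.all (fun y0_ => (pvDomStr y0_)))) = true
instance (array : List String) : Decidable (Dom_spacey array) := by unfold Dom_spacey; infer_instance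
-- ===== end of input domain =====

-- B replaces A's nested inner loop (rebuilding each prefix from scratch) by a single pass
-- maintaining a running accumulator string (objective: faster, O(n) appends instead of O(n^2)).

-- ===== PORT A =====
-- literal transliteration of A: outer loop over range(len), inner loop rebuilding the word
def spacey (array : List String) : List String :=
  let len_array : Int := array.length
  (PySem.List.pyRange 0 len_array 1).foldl (fun return_list index =>
    let return_word : String :=
      (PySem.List.pyRange 0 (index + 1) 1).foldl
        (fun return_word second_index => return_word ++ PySem.List.pyGetD array second_index "") ""
    return_list ++ [return_word]) []

-- ===== PORT B =====
-- one pass: running accumulator string, append a copy at each step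
def spacey_alt (array : List String) : List String :=
  (array.foldl (fun (st : String × List String) word =>
    let acc := st.1 ++ word
    (acc, st.2 ++ [acc])) ("", [])).2

-- ===== PRECONDITION & SPEC =====
def Spec_spacey (array : List String) (out : List String) : Prop := out = spacey_alt array
instance (array : List String) (out : List String) : Decidable (Spec_spacey array out) := by unfold Spec_spacey; infer_instance

-- ===== CLAIM (what is proved, stated in full; the proofs are below) =====
def Claim_equal_spacey : Prop := ∀ (array : List String), Dom_spacey array → Spec_spacey array (spacey array)

-- ===== LEMMAS AND PROOFS =====

-- concatenation of a list of strings, the common spec value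
def pvCat (l : List String) : String := l.foldl (· ++ ·) ""

theorem pv_foldl_append_shift (l : List String) (a b : String) :
    l.foldl (· ++ ·) (a ++ b) = a ++ l.foldl (· ++ ·) b := by
  induction l generalizing b with
  | nil => rfl
  | cons x t ih => simpa [String.append_assoc] using ih (b ++ x)

-- A's inner loop computes the concatenation of the first m elements
theorem pv_inner (array : List String) (m : ℕ) (hm : m ≤ array.length) :
    (PySem.List.pyRange 0 ((m : Int)) 1).foldl
        (fun w j => w ++ PySem.List.pyGetD array j "") ""
      = pvCat (array.take m) := by
  induction m with
  | zero => simp [PySem.List.pyRange_one_eq_nil, pvCat]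
  | succ k ih =>
    have hk : k ≤ array.length := Nat.le_of_succ_le hm
    have hsplit : PySem.List.pyRange 0 ((k + 1 : ℕ) : Int) 1
        = PySem.List.pyRange 0 (k : Int) 1 ++ [(k : Int)] := by
      have := PySem.List.pyRange_one_succ_right (a := 0) (b := (k : Int)) (by exact_mod_cast Nat.zero_le k)
      simpa [Nat.cast_add, Nat.cast_one] using this
    have hget : PySem.List.pyGetD array ((k : Int)) "" = array[k]'(Nat.lt_of_succ_le hm) := by
      simp [PySem.List.pyGetD_natCast, List.getD, Nat.lt_of_succ_le hm]
    have htake : array.take (k + 1) = array.take k ++ [array[k]'(Nat.lt_of_succ_le hm)] := by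
      rw [List.take_add_one, List.getElem?_eq_getElem (Nat.lt_of_succ_le hm)]; rfl
    calc (PySem.List.pyRange 0 ((k + 1 : ℕ) : Int) 1).foldl
            (fun w j => w ++ PySem.List.pyGetD array j "") ""
        = ((PySem.List.pyRange 0 (k : Int) 1).foldl
            (fun w j => w ++ PySem.List.pyGetD array j "") "") ++ PySem.List.pyGetD array (k : Int) "" := by
          rw [hsplit, List.foldl_append]; rfl
      _ = pvCat (array.take (k + 1)) := by
          rw [ih hk, hget]
          simp only [pvCat]
          rw [htake, List.foldl_append]
          rfl

-- A equals the list of prefix concatenations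
theorem pv_A_eq (array : List String) :
    spacey array = (List.range array.length).map (fun k => pvCat (array.take (k + 1))) := by
  unfold spacey
  rw [PySem.List.foldl_append_singleton_eq_map]
  rw [PySem.List.pyRange_one (a := 0) (b := (array.length : Int))]
  simp only [List.map_map, Int.sub_zero, Int.toNat_natCast, List.nil_append]
  apply List.map_congr_left
  intro k hk
  have hk' : k < array.length := List.mem_range.mp hk
  have := pv_inner array (k + 1) (Nat.succ_le_of_lt hk')
  simpa [Function.comp, Nat.cast_add, Nat.cast_one] using this

-- B's fold, generalized over the running state
theorem pv_B_eq (array : List String) (s : String) (res : List String) :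
    (array.foldl (fun (st : String × List String) word =>
        let acc := st.1 ++ word
        (acc, st.2 ++ [acc])) (s, res)).2
      = res ++ (List.range array.length).map (fun k => s ++ pvCat (array.take (k + 1))) := by
  induction array generalizing s res with
  | nil => simp
  | cons x t ih =>
    simp only [List.foldl_cons, List.length_cons]
    rw [ih (s ++ x) (res ++ [s ++ x])]
    rw [List.range_succ_eq_map]
    simp only [List.map_cons, List.map_map, List.append_assoc, List.cons_append, List.nil_append]
    refine congrArg (res ++ ·) ?_
    refine congrArg₂ List.cons ?_ ?_
    · simp [pvCat]
    · apply List.map_congr_left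
      intro a _
      have h := pv_foldl_append_shift (t.take (a + 1)) x ""
      simp only [String.append_empty] at h
      simp [Function.comp, pvCat, h, String.append_assoc]

-- ===== VERDICT (by name: the statement is the Claim_ definition above) =====
theorem spacey_spec : Claim_equal_spacey := by
  intro array _
  unfold Spec_spacey spacey_alt
  rw [pv_B_eq array "" [], pv_A_eq array]
  simp
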